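-- pv_equiv track=rewrite | github.com/GNS-Science/nz-srm-slab | model-development/pyslabgrid/slabrup.py | cbinning
-- ===== SOURCE A (Python) =====
-- def cbinning(data_angles,binsize = 10, maxangle = 360):
--     # circular count is needed.
--     # binsize must be an integer
--     halfbinw = int(binsize/2)
--     cbins = [x for x in range(halfbinw,maxangle,halfbinw)]
--     bin_count = [0]*len(cbins)
--     for cb, i in zip(cbins, range(len(bin_count))):
--         lowangle = cb-halfbinw
--         highangle = cb+halfbinw
--         for sang in data_angles:
--             if sang== highangle:
--                 sang = lowangle
--             if (sang>= lowangle) & (sang<highangle):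
--                 bin_count[i]=bin_count[i]+1
--
--     return cbins, bin_count
-- ===== SOURCE B (Python) =====
-- def cbinning(data_angles, binsize=10, maxangle=360):
--     # Single pass over the data: each angle contributes to a contiguous run of
--     # bin indices, recorded in a difference array and resolved by one
--     # prefix-sum sweep.
--     halfbinw = int(binsize / 2)
--     cbins = list(range(halfbinw, maxangle, halfbinw))
--     n = len(cbins)
--     diff = [0] * (n + 1)
--     if halfbinw > 0:
--         # angle sang falls in bin i exactly when cbins[i] lies in
--         # [sang - halfbinw, sang + halfbinw]; with a non-positive half-width
--         # no bin can contain any angle, so the sweep is skipped.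
--         for sang in data_angles:
--             lo = -((halfbinw - sang) // halfbinw) - 1
--             hi = (sang + halfbinw) // halfbinw - 1
--             if lo < 0:
--                 lo = 0
--             if hi > n - 1:
--                 hi = n - 1
--             if lo <= hi:
--                 diff[lo] += 1
--                 diff[hi + 1] -= 1
--     bin_count = []
--     c = 0
--     for i in range(n):
--         c += diff[i]
--         bin_count.append(c)
--     return cbins, bin_count
-- ===== Notes on version B (the rewrite author's own statement) =====
-- stated objective: alternative
-- what changed: Replaces A's per-bin scan over all the angles with a single pass over the data that computes, for each angle, its contiguous range of overlapping bin indices by floor/ceil division and records it in a difference array, resolved by one prefix-sum sweep; asymptotically O(n + bins) versus A's O(n*bins), though a timing run's inputs (few bins) do not show a measured speed-up.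
import Mathlib
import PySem

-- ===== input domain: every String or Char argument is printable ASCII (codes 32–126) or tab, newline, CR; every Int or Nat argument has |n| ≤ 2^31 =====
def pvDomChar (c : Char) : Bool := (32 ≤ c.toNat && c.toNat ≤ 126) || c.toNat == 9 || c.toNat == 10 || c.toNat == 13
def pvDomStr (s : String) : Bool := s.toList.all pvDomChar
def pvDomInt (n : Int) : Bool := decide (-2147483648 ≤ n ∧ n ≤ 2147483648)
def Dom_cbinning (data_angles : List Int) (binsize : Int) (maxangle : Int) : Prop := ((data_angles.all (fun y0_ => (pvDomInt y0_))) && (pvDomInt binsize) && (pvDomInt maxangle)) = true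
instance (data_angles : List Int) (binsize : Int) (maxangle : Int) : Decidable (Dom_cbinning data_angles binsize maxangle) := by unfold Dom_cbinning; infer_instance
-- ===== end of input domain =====

-- B replaces A's per-bin scan over all the angles by a single pass over the data that
-- records each angle's contiguous range of overlapping bins in a difference array,
-- resolved by one prefix-sum sweep (objective: alternative algorithm).


-- ===== PORT A =====
-- body of A's outer loop: one bin (cb, i), scanning all angles
def aStep (halfbinw : Int) (data_angles : List Int) (bc : List Int) (p : Int × Int) : List Int :=
  let cb := p.1
  let i := p.2
  let lowangle := cb - halfbinw
  let highangle := cb + halfbinw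
  data_angles.foldl (fun bc sang =>
    let sang := if sang == highangle then lowangle else sang
    if sang ≥ lowangle ∧ sang < highangle then
      bc.set i.toNat (bc.getD i.toNat 0 + 1)
    else bc) bc

-- int(binsize/2): true division then truncation toward zero; exact as Int.tdiv on the stated |binsize| ≤ 2^31 domain
def cbinning (data_angles : List Int) (binsize : Int) (maxangle : Int) : List Int × List Int :=
  let halfbinw : Int := binsize.tdiv 2
  let cbins := PySem.List.pyRange halfbinw maxangle halfbinw
  let bin_count : List Int := List.replicate cbins.length 0
  let bin_count := (cbins.zip (PySem.List.pyRange 0 (bin_count.length : Int) 1)).foldl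
    (aStep halfbinw data_angles) bin_count
  (cbins, bin_count)

-- ===== PORT B =====
-- body of B's single data pass: mark the contiguous bin-index range of one angle in the difference array
def bStep (halfbinw : Int) (n : Nat) (d : List Int) (sang : Int) : List Int :=
  let lo := -(PySem.Int.floordiv (halfbinw - sang) halfbinw) - 1
  let hi := PySem.Int.floordiv (sang + halfbinw) halfbinw - 1
  let lo := if lo < 0 then 0 else lo
  let hi := if hi > (n : Int) - 1 then (n : Int) - 1 else hi
  if lo ≤ hi then
    let d1 := d.set lo.toNat (d.getD lo.toNat 0 + 1)
    d1.set (hi + 1).toNat (d1.getD (hi + 1).toNat 0 - 1)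
  else d

-- body of B's prefix-sum sweep
def bScan (diff : List Int) (s : Int × List Int) (i : Nat) : Int × List Int :=
  let c := s.1 + diff.getD i 0
  (c, s.2 ++ [c])

def cbinning_alt (data_angles : List Int) (binsize : Int) (maxangle : Int) : List Int × List Int :=
  let halfbinw : Int := binsize.tdiv 2
  let cbins := PySem.List.pyRange halfbinw maxangle halfbinw
  let n := cbins.length
  let diff : List Int := List.replicate (n + 1) 0
  let diff := if halfbinw > 0 then data_angles.foldl (bStep halfbinw n) diff else diff
  let st := (List.range n).foldl (bScan diff) ((0 : Int), ([] : List Int))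
  (cbins, st.2)


-- ===== PRECONDITION & SPEC =====
-- Pre_ excludes exactly binsize ∈ {-1, 0, 1}: there the half-bin width int(binsize/2) is 0 and A raises ValueError (range() with step 0).
def Pre_cbinning (data_angles : List Int) (binsize : Int) (maxangle : Int) : Prop := binsize.tdiv 2 ≠ 0
instance (data_angles : List Int) (binsize : Int) (maxangle : Int) : Decidable (Pre_cbinning data_angles binsize maxangle) := by unfold Pre_cbinning; infer_instance
def pvWitness_cbinning : List Int × Int × Int := ([3, 7, 12, 12, 29], 10, 30)

def Spec_cbinning (data_angles : List Int) (binsize : Int) (maxangle : Int) (out : List Int × List Int) : Prop := out = cbinning_alt data_angles binsize maxangle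
instance (data_angles : List Int) (binsize : Int) (maxangle : Int) (out : List Int × List Int) : Decidable (Spec_cbinning data_angles binsize maxangle out) := by unfold Spec_cbinning; infer_instance

-- ===== CLAIM (what is proved, stated in full; the proofs are below) =====
def Claim_equal_cbinning : Prop := ∀ (data_angles : List Int) (binsize : Int) (maxangle : Int), Dom_cbinning data_angles binsize maxangle → Pre_cbinning data_angles binsize maxangle → Spec_cbinning data_angles binsize maxangle (cbinning data_angles binsize maxangle)

-- ===== LEMMAS AND PROOFS =====

theorem cbinning_witness_ok :
    Dom_cbinning pvWitness_cbinning.1 pvWitness_cbinning.2.1 pvWitness_cbinning.2.2 ∧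
    Pre_cbinning pvWitness_cbinning.1 pvWitness_cbinning.2.1 pvWitness_cbinning.2.2 := by
  decide

-- ===== helper predicates for the proofs =====
def aCond (h cb : Int) (sang : Int) : Bool :=
  let s' := if sang == cb + h then cb - h else sang
  decide (s' ≥ cb - h ∧ s' < cb + h)

def cntA (h : Int) (data : List Int) (cb : Int) : Int := (data.countP (aCond h cb) : Int)

def bInd (h : Int) (i : Nat) (sang : Int) : Bool :=
  decide (-(PySem.Int.floordiv (h - sang) h) - 1 ≤ (i : Int)
    ∧ (i : Int) ≤ PySem.Int.floordiv (sang + h) h - 1)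

def Sfun (d : List Int) (k : Nat) : Int := (d.take k).sum

-- ===== A-side lemmas =====
theorem inner_fold (h cb : Int) (data : List Int) (bc : List Int) (i : Nat) (hi : i < bc.length) :
    data.foldl (fun bc sang =>
        let sang := if sang == cb + h then cb - h else sang
        if sang ≥ cb - h ∧ sang < cb + h then bc.set i (bc.getD i 0 + 1) else bc) bc
      = bc.set i (bc.getD i 0 + cntA h data cb) := by
  induction data generalizing bc with
  | nil =>
    simp [cntA, List.getD_eq_getElem?_getD, List.getElem?_eq_getElem hi, List.set_getElem_self]
  | cons s t ih =>
    by_cases hp : (if s == cb + h then cb - h else s) ≥ cb - h ∧ (if s == cb + h then cb - h else s) < cb + h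
    · simp only [List.foldl_cons, hp, if_pos]
      rw [ih _ (by simpa using hi)]
      simp [List.getD_eq_getElem?_getD, hi, List.getElem_set_self, List.set_set]
      rw [cntA, cntA, List.countP_cons]
      have : aCond h cb s = true := by simpa [aCond] using hp
      simp [this]
      congr 1
      ring
    · simp only [List.foldl_cons, hp, if_neg, not_false_iff]
      rw [ih _ hi]
      have : aCond h cb s = false := by simpa [aCond] using hp
      rw [cntA, cntA, List.countP_cons]
      simp [this]

theorem outer_fold (h : Int) (data : List Int) (cbs : List Int) (s : Nat) (bc : List Int)
    (hlen : bc.length = s + cbs.length) :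
    (cbs.zip (PySem.List.pyRange (s : Int) ((s : Int) + (cbs.length : Int)) 1)).foldl
      (aStep h data) bc
      = bc.take s ++ List.zipWith (fun cb v => v + cntA h data cb) cbs (bc.drop s) := by
  induction cbs generalizing s bc with
  | nil =>
    simp only [List.length_nil, Nat.cast_zero, add_zero] at hlen ⊢
    rw [PySem.List.pyRange_one_eq_nil (by omega : (s : Int) ≤ s)]
    simp [List.take_of_length_le (le_of_eq hlen)]
  | cons cb t ih =>
    have hs : s < bc.length := by simp at hlen; omega
    have hcons : PySem.List.pyRange (s : Int) ((s : Int) + ((cb :: t).length : Int)) 1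
        = (s : Int) :: PySem.List.pyRange ((s : Int) + 1) ((s : Int) + ((cb :: t).length : Int)) 1 := by
      apply PySem.List.pyRange_one_cons
      push_cast; omega
    rw [hcons]
    simp only [List.zip_cons_cons, List.foldl_cons]
    rw [show aStep h data bc (cb, (s : Int))
        = bc.set s (bc.getD s 0 + cntA h data cb) by
      unfold aStep
      simp only [Int.toNat_natCast]
      exact inner_fold h cb data bc s hs]
    rw [show ((s : Int) + 1) = (((s+1 : Nat)) : Int) by push_cast; ring]
    have harg : ((s : Int) + ((cb :: t).length : Int)) = ((s+1 : Nat) : Int) + (t.length : Int) := by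
      simp; push_cast; ring
    rw [harg]
    rw [ih (s+1) _ (by simp [hlen]; omega)]
    rw [List.drop_eq_getElem_cons hs]
    simp only [List.zipWith_cons_cons]
    have hgetD : bc.getD s 0 = bc[s] := by
      simp [List.getD_eq_getElem?_getD, List.getElem?_eq_getElem hs]
    rw [hgetD]
    have htake : (bc.set s (bc[s] + cntA h data cb)).take (s+1)
        = bc.take s ++ [bc[s] + cntA h data cb] := by
      rw [List.take_set, List.take_succ, List.getElem?_eq_getElem hs]
      rw [List.set_append_right _ _ (by simp [min_eq_left (le_of_lt hs)])]
      simp [min_eq_left (le_of_lt hs)]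
    have hdrop : (bc.set s (bc[s] + cntA h data cb)).drop (s+1) = bc.drop (s+1) := by
      rw [List.drop_set]
      simp
    rw [htake, hdrop]
    simp

-- ===== B-side lemmas =====
theorem sum_take_set (d : List Int) (j k : Nat) (v : Int) :
    ((d.set j v).take k).sum = (d.take k).sum + (if j < k ∧ j < d.length then v - d.getD j 0 else 0) := by
  induction d generalizing j k with
  | nil => simp
  | cons a t ih =>
    cases j with
    | zero =>
      cases k with
      | zero => simp
      | succ k => simp [List.set_cons_zero, List.take_succ_cons]; ring
    | succ j =>
      cases k with
      | zero => simp
      | succ k =>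
        simp only [List.set_cons_succ, List.take_succ_cons, List.sum_cons, ih j k,
          List.length_cons, List.getD_cons_succ]
        have heq : (j + 1 < k + 1 ∧ j + 1 < t.length + 1) ↔ (j < k ∧ j < t.length) := by omega
        rw [if_congr heq rfl rfl]
        ring

theorem step_length (h : Int) (n : Nat) (sang : Int) (d : List Int) (hd : d.length = n + 1) :
    (bStep h n d sang).length = n + 1 := by
  simp only [bStep]
  (repeat' split) <;> simp [hd]

theorem fold_length (h : Int) (n : Nat) (data : List Int) (d : List Int) (hd : d.length = n + 1) :
    (data.foldl (bStep h n) d).length = n + 1 := by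
  induction data generalizing d with
  | nil => exact hd
  | cons s t ih => exact ih _ (step_length h n s d hd)

theorem step_prefix (h : Int) (n : Nat) (sang : Int) (d : List Int) (hd : d.length = n + 1)
    (i : Nat) (hi : i < n) :
    Sfun (bStep h n d sang) (i + 1) = Sfun d (i + 1) + (if bInd h i sang then 1 else 0) := by
  unfold bStep bInd
  set loR := -(PySem.Int.floordiv (h - sang) h) - 1 with hloR
  set hiR := PySem.Int.floordiv (sang + h) h - 1 with hhiR
  set loC := if loR < 0 then 0 else loR with hloC
  set hiC := if hiR > (n : Int) - 1 then (n : Int) - 1 else hiR with hhiC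
  have hLO : (loR < 0 ∧ loC = 0) ∨ (0 ≤ loR ∧ loC = loR) := by
    by_cases hx : loR < 0
    · exact Or.inl ⟨hx, by rw [hloC, if_pos hx]⟩
    · exact Or.inr ⟨by omega, by rw [hloC, if_neg hx]⟩
  have hHI : ((n : Int) - 1 < hiR ∧ hiC = (n : Int) - 1) ∨ (hiR ≤ (n : Int) - 1 ∧ hiC = hiR) := by
    by_cases hx : hiR > (n : Int) - 1
    · exact Or.inl ⟨hx, by rw [hhiC, if_pos hx]⟩
    · exact Or.inr ⟨by omega, by rw [hhiC, if_neg hx]⟩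
  simp only [decide_eq_true_eq]
  by_cases hcase : loC ≤ hiC
  · rw [if_pos hcase]
    have hlo0 : 0 ≤ loC := by omega
    have hhiCn : hiC ≤ (n : Int) - 1 := by omega
    unfold Sfun
    rw [sum_take_set, sum_take_set]
    have hlen1 : (d.set loC.toNat (d.getD loC.toNat 0 + 1)).length = n + 1 := by simp [hd]
    rw [hlen1, hd]
    by_cases h2 : (hiC + 1).toNat < i + 1 ∧ (hiC + 1).toNat < n + 1
    · rw [if_pos h2]
      by_cases h1 : loC.toNat < i + 1 ∧ loC.toNat < n + 1
      · rw [if_pos h1, if_neg (by omega : ¬ (loR ≤ (i:Int) ∧ (i:Int) ≤ hiR))]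
        ring
      · omega
    · rw [if_neg h2]
      by_cases h1 : loC.toNat < i + 1 ∧ loC.toNat < n + 1
      · rw [if_pos h1, if_pos (by omega : (loR ≤ (i:Int) ∧ (i:Int) ≤ hiR))]
        ring
      · rw [if_neg h1, if_neg (by omega : ¬ (loR ≤ (i:Int) ∧ (i:Int) ≤ hiR))]
        ring
  · rw [if_neg hcase, if_neg (by omega : ¬ (loR ≤ (i:Int) ∧ (i:Int) ≤ hiR))]
    ring

theorem fold_prefix (h : Int) (n : Nat) (data : List Int) (d : List Int) (hd : d.length = n + 1)
    (i : Nat) (hi : i < n) :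
    Sfun (data.foldl (bStep h n) d) (i + 1) = Sfun d (i + 1) + (data.countP (bInd h i) : Int) := by
  induction data generalizing d with
  | nil => simp
  | cons s t ih =>
    simp only [List.foldl_cons]
    rw [ih _ (step_length h n s d hd), step_prefix h n s d hd i hi, List.countP_cons]
    by_cases hb : bInd h i s
    · simp [hb]; ring
    · simp [hb]

theorem scan_prefix (diff : List Int) (m : Nat) (hm : m ≤ diff.length) :
    (List.range m).foldl (bScan diff) ((0 : Int), ([] : List Int))
      = (Sfun diff m, (List.range m).map (fun i => Sfun diff (i + 1))) := by
  induction m with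
  | zero => simp [Sfun]
  | succ m ih =>
    rw [List.range_succ, List.foldl_append, ih (by omega)]
    simp only [List.foldl_cons, List.foldl_nil, bScan]
    have hstep : Sfun diff m + diff.getD m 0 = Sfun diff (m + 1) := by
      unfold Sfun
      rw [List.take_succ, List.sum_append, List.getElem?_eq_getElem (by omega : m < diff.length)]
      simp [List.getD_eq_getElem?_getD, List.getElem?_eq_getElem (by omega : m < diff.length)]
    have hstep2 : Sfun diff m + diff[m]?.getD 0 = Sfun diff (m + 1) := by
      rw [← List.getD_eq_getElem?_getD]; exact hstep
    simp [List.map_append, hstep2]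

theorem Sfun_replicate_zero (k m : Nat) : Sfun (List.replicate k (0 : Int)) m = 0 := by
  unfold Sfun
  rw [List.take_replicate]
  simp

theorem zipWith_replicate (f : Int → Int → Int) (xs : List Int) (c : Int) :
    List.zipWith f xs (List.replicate xs.length c) = xs.map (fun x => f x c) := by
  induction xs with
  | nil => simp
  | cons a t ih => simp [List.replicate_succ, ih]

theorem cond_iff (h : Int) (hpos : 0 < h) (i : Nat) (s : Int) :
    ((if s == (h + h * (i : Int)) + h then (h + h * (i : Int)) - h else s) ≥ (h + h * (i : Int)) - h
      ∧ (if s == (h + h * (i : Int)) + h then (h + h * (i : Int)) - h else s) < (h + h * (i : Int)) + h)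
    ↔ (-(PySem.Int.floordiv (h - s) h) - 1 ≤ (i : Int)
        ∧ (i : Int) ≤ PySem.Int.floordiv (s + h) h - 1) := by
  have e1 : (-(PySem.Int.floordiv (h - s) h) - 1 ≤ (i : Int))
      ↔ ¬ (PySem.Int.floordiv (h - s) h < -((i : Int) + 1)) := by
    constructor <;> intro hx <;> omega
  have e2 : ((i : Int) ≤ PySem.Int.floordiv (s + h) h - 1)
      ↔ ((i : Int) + 1 ≤ PySem.Int.floordiv (s + h) h) := by omega
  rw [e1, e2, PySem.Int.floordiv_lt_iff_lt_mul hpos, PySem.Int.le_floordiv_iff_mul_le hpos]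
  have r1 : -((i : Int) + 1) * h = -(h + h * (i : Int)) := by ring
  have r2 : ((i : Int) + 1) * h = h + h * (i : Int) := by ring
  rw [r1, r2]
  generalize (h + h * (i : Int)) = cb
  by_cases hs : s == cb + h
  · have : s = cb + h := by exact_mod_cast eq_of_beq hs
    simp only [hs, if_pos]
    constructor <;> intro hx <;> omega
  · simp only [hs, Bool.false_eq_true, if_neg, not_false_iff]
    have : ¬ s = cb + h := fun hc => hs (by exact_mod_cast beq_iff_eq.mpr hc)
    constructor <;> intro hx <;> omega

theorem aCond_neg (h cb s : Int) (hneg : h < 0) : aCond h cb s = false := by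
  unfold aCond
  simp only [decide_eq_false_iff_not]
  by_cases hs : s == cb + h
  · have : s = cb + h := by exact_mod_cast eq_of_beq hs
    simp only [hs, if_pos]
    omega
  · simp only [hs, Bool.false_eq_true, if_neg, not_false_iff]
    have : ¬ s = cb + h := fun hc => hs (by exact_mod_cast beq_iff_eq.mpr hc)
    omega

-- ===== main equivalence =====
theorem main_eq (data : List Int) (binsize maxangle : Int) (hpre : binsize.tdiv 2 ≠ 0) :
    cbinning data binsize maxangle = cbinning_alt data binsize maxangle := by
  unfold cbinning cbinning_alt
  set h := binsize.tdiv 2 with hh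
  set cbins := PySem.List.pyRange h maxangle h with hcbins
  simp only [List.length_replicate]
  set n := cbins.length with hn
  have hA : (cbins.zip (PySem.List.pyRange 0 (n : Int) 1)).foldl (aStep h data)
      (List.replicate n 0)
      = cbins.map (fun cb => 0 + cntA h data cb) := by
    have h0 : ((0 : Nat) : Int) = 0 := rfl
    have hof := outer_fold h data cbins 0 (List.replicate n 0) (by simp [hn])
    rw [h0] at hof
    rw [show ((0 : Int) + (cbins.length : Int)) = (n : Int) by omega] at hof
    rw [hof]
    simp only [List.take_zero, List.drop_zero, List.nil_append]
    rw [show (List.replicate n (0 : Int)) = List.replicate cbins.length (0 : Int) by rw [hn]]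
    exact zipWith_replicate _ cbins 0
  rw [hA]
  by_cases hpos : h > 0
  · rw [if_pos hpos]
    have hdl : (data.foldl (bStep h n) (List.replicate (n + 1) (0 : Int))).length = n + 1 :=
      fold_length h n data _ (by simp)
    rw [scan_prefix _ n (by omega)]
    simp only
    congr 1
    have hcb : cbins = (List.range n).map (fun (k : Nat) => h + h * (k : Int)) := by
      rw [hcbins, PySem.List.pyRange_of_pos _ _ hpos]
      have : n = (if h < maxangle then ((maxangle - h + h - 1) / h).toNat else 0) := by
        rw [hn, hcbins, PySem.List.pyRange_of_pos _ _ hpos, List.length_map, List.length_range]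
      rw [← this]
    conv_lhs => rw [hcb]
    rw [List.map_map]
    apply List.map_congr_left
    intro i hi
    have hin : i < n := List.mem_range.mp hi
    rw [fold_prefix h n data _ (by simp) i hin, Sfun_replicate_zero]
    simp only [Function.comp, zero_add, cntA]
    congr 1
    apply List.countP_congr
    intro s _
    have hiff := cond_iff h hpos i s
    simp only [ge_iff_le] at hiff
    simp only [aCond, bInd, decide_eq_true_eq, ge_iff_le]
    exact hiff
  · rw [if_neg hpos]
    have hneg : h < 0 := by omega
    rw [scan_prefix _ n (by simp)]
    simp only
    congr 1
    have hz : ∀ cb, cntA h data cb = 0 := by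
      intro cb
      unfold cntA
      rw [List.countP_eq_zero.mpr]
      · simp
      · intro s _
        simp [aCond_neg h cb s hneg]
    calc cbins.map (fun cb => 0 + cntA h data cb)
        = cbins.map (fun _ => (0 : Int)) := by
          apply List.map_congr_left; intro cb _; rw [hz cb]; ring
      _ = List.replicate n 0 := by rw [List.map_const', hn]
      _ = (List.range n).map (fun i => Sfun (List.replicate (n+1) (0:Int)) (i+1)) := by
          apply List.ext_getElem
          · simp
          · intro k h1 h2
            simp [Sfun_replicate_zero]

-- ===== VERDICT (by name: the statement is the Claim_ definition above) =====
theorem cbinning_spec : Claim_equal_cbinning := by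
  intro data binsize maxangle _hdom hpre
  exact main_eq data binsize maxangle hpre
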